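-- pv_equiv track=rewrite | github.com/thahmann/macleod | src/p9_tools/parse/theory.py | signatures
-- ===== SOURCE A (Python) =====
-- def signatures(lines):
--     s = set()
--     primitives = ["leq"]
--
--     for axiom in lines:
--         for i, char in enumerate(axiom):
--             if char == "(" and axiom[i-1].isalpha():
--                 j = i-1
--                 signature = ""
--                 # accounts for signatures containing letters, numbers and underscores
--                 while (axiom[j].isalpha() or axiom[j].isnumeric() or axiom[j] == "_") and j >= 0:
--                     signature = axiom[j] + signature    # appending letter to the front of string
--                     j -= 1
--                 if signature and signature not in primitives:
--                     s.add(signature)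
--     return s
-- ===== SOURCE B (Python) =====
-- def signatures(lines):
--     s = set()
--     for axiom in lines:
--         token = ""
--         for char in axiom:
--             if char.isalpha() or char.isnumeric() or char == "_":
--                 token += char
--             else:
--                 if char == "(" and token and token[-1].isalpha() and token != "leq":
--                     s.add(token)
--                 token = ""
--     return s
-- ===== Notes on version B (the rewrite author's own statement) =====
-- stated objective: simpler
-- what changed: Replaces the per-'(' backward character walk (which rebuilds each signature by prepending chars and probes axiom[i-1] with possible negative-index wraparound) with a single forward pass per line that accumulates the current maximal identifier run and emits it when a '(' follows and its last char is a letter.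
import Mathlib
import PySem

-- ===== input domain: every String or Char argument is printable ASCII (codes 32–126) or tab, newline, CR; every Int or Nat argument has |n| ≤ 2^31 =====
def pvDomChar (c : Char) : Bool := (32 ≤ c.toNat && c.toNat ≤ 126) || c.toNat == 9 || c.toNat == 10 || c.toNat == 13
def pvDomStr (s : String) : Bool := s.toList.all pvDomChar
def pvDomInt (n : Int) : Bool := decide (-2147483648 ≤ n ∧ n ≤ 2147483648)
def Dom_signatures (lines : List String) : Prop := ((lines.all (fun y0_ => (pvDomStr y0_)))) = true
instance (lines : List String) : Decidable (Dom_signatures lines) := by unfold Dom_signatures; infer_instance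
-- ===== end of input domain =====

-- B replaces A's per-'(' backward character walk with a single forward pass per line
-- that accumulates the current identifier run (simpler, one scan per line).
-- Python A returns a set; per the type convention both ports return its distinct elements as a list.


-- ===== PORT A =====
-- char.isalpha() / char.isnumeric(): exact on the ASCII domain (Dom_signatures)
def pyIsAlpha (c : Char) : Bool := ('a' ≤ c && c ≤ 'z') || ('A' ≤ c && c ≤ 'Z')
def pyIsNum (c : Char) : Bool := '0' ≤ c && c ≤ '9'

-- the inner 'while (axiom[j].isalpha() or axiom[j].isnumeric() or axiom[j] == "_") and j >= 0'
-- loop; sig is Python's 'signature' as a char list; fuel only bounds the recursion (the supplied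
-- fuel i+1 is always enough: j starts at i-1 and each pass decrements it, stopping at j = -1).
-- The 'none' branch is unreachable on actual calls (j ≥ -1 on a nonempty line), as in Python,
-- which never raises here.
def walkA (full : List Char) : Nat → Int → List Char → List Char
  | 0, _, sig => sig
  | fuel+1, j, sig =>
    match PySem.List.pyGet? full j with
    | none => sig
    | some c =>
      if (pyIsAlpha c || pyIsNum c || c == '_') && decide (0 ≤ j) then
        walkA full fuel (j - 1) (c :: sig)        -- signature = axiom[j] + signature
      else sig

-- 'for i, char in enumerate(axiom)' with its body ('axiom' is a Lean keyword, hence 'ax')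
def lineA (full : List Char) : List Char → Nat → PySem.Set String → PySem.Set String
  | [], _, s => s
  | char :: rest, i, s =>
    lineA full rest (i + 1)
      (if char == '(' &&
          (match PySem.List.pyGet? full ((i : Int) - 1) with
           | some c => pyIsAlpha c
           | none => false) then
        (if walkA full (i + 1) ((i : Int) - 1) [] ≠ [] ∧
            String.ofList (walkA full (i + 1) ((i : Int) - 1) []) ∉ (["leq"] : List String)
         then PySem.Set.add s (String.ofList (walkA full (i + 1) ((i : Int) - 1) []))
         else s)
       else s)

def signatures (lines : List String) : List String :=
  lines.foldl (fun s ax => lineA ax.toList ax.toList 0 s) PySem.Set.empty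

-- ===== PORT B =====
def tokChar (c : Char) : Bool := pyIsAlpha c || pyIsNum c || c == '_'

-- forward scan: tok is the current maximal identifier run; a token at end of line is discarded
def goB : List Char → List Char → PySem.Set String → PySem.Set String
  | [], _, s => s
  | c :: rest, tok, s =>
    if tokChar c then goB rest (tok ++ [c]) s
    else
      goB rest []
        (if c = '(' ∧ tok ≠ [] ∧ pyIsAlpha (tok.getLast?.getD ' ') ∧ String.ofList tok ≠ "leq"
         then PySem.Set.add s (String.ofList tok) else s)

def signatures_alt (lines : List String) : List String :=
  lines.foldl (fun s ax => goB ax.toList [] s) PySem.Set.empty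

-- ===== PRECONDITION & SPEC =====
def Spec_signatures (lines : List String) (out : List String) : Prop := out = signatures_alt lines
instance (lines : List String) (out : List String) : Decidable (Spec_signatures lines out) := by unfold Spec_signatures; infer_instance

-- ===== CLAIM (what is proved, stated in full; the proofs are below) =====
def Claim_equal_signatures : Prop := ∀ (lines : List String), Dom_signatures lines → Spec_signatures lines (signatures lines)

-- ===== LEMMAS AND PROOFS =====

-- the maximal tokChar suffix of a prefix
def tokRun (pre : List Char) : List Char := (pre.reverse.takeWhile tokChar).reverse

lemma tokRun_nil : tokRun [] = [] := rfl

lemma tokRun_concat (pre : List Char) (c : Char) :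
    tokRun (pre ++ [c]) = if tokChar c then tokRun pre ++ [c] else [] := by
  simp only [tokRun, List.reverse_append, List.reverse_cons, List.reverse_nil, List.nil_append,
    List.cons_append, List.takeWhile]
  by_cases h : tokChar c <;> simp [h]

lemma walkA_spec (pre rest : List Char) (fuel : Nat) (sig : List Char)
    (h : pre.length < fuel) :
    walkA (pre ++ rest) fuel ((pre.length : Int) - 1) sig = tokRun pre ++ sig := by
  induction pre using List.reverseRecOn generalizing rest fuel sig with
  | nil =>
    obtain ⟨f, rfl⟩ : ∃ f, fuel = f + 1 := ⟨fuel - 1, by omega⟩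
    simp only [List.length_nil, Nat.cast_zero, zero_sub, List.nil_append, walkA]
    cases hg : PySem.List.pyGet? rest (-1) with
    | none => simp [tokRun_nil]
    | some c => simp [tokRun_nil]
  | append_singleton pre' p ih =>
    obtain ⟨f, rfl⟩ : ∃ f, fuel = f + 1 := ⟨fuel - 1, by omega⟩
    have hlen : ((pre' ++ [p]).length : Int) - 1 = (pre'.length : Int) := by simp
    have hget : PySem.List.pyGet? (pre' ++ [p] ++ rest) (pre'.length : Int) = some p := by
      rw [List.append_assoc, List.singleton_append]
      exact PySem.List.pyGet?_append_length pre' rest p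
    rw [hlen, walkA, hget]
    have h0 : decide (0 ≤ (pre'.length : Int)) = true := by simp
    by_cases hp : tokChar p
    · simp only [tokChar] at hp
      simp only [hp, h0, Bool.and_self, if_true]
      have hrec := ih (p :: rest) f (p :: sig) (by simp at h; omega)
      rw [List.append_assoc, List.singleton_append, hrec, tokRun_concat, if_pos (by simpa [tokChar] using hp)]
      simp
    · simp only [tokChar, Bool.not_eq_true] at hp
      simp only [hp, Bool.false_and, Bool.false_eq_true, if_false]
      rw [tokRun_concat, if_neg (by simp [tokChar, hp]), List.nil_append]

lemma getLast_tokRun_concat (pre : List Char) (p : Char) (hp : tokChar p) :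
    (tokRun (pre ++ [p])).getLast?.getD ' ' = p := by
  rw [tokRun_concat, if_pos hp]; simp

-- the heart: A's enumerate loop from index pre.length = B's forward scan with tok = tokRun pre
lemma lineA_eq_goB (rest pre : List Char) (s : PySem.Set String) :
    lineA (pre ++ rest) rest pre.length s = goB rest (tokRun pre) s := by
  induction rest generalizing pre s with
  | nil => rfl
  | cons c rest' ih =>
    rw [lineA, goB]
    have hfull : pre ++ c :: rest' = (pre ++ [c]) ++ rest' := by simp
    have ihc := ih (pre := pre ++ [c])
    simp only [List.length_append, List.length_cons, List.length_nil] at ihc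
    by_cases hc : tokChar c
    · -- c is an identifier char: A's condition is false (c ≠ '('), B extends tok
      have hne : (c == '(') = false := by
        rcases eq_or_ne c '(' with rfl | h
        · exact absurd hc (by decide)
        · simp [h]
      rw [if_pos hc]
      simp only [hne, Bool.false_and, Bool.false_eq_true, if_false]
      rw [hfull, ihc, tokRun_concat, if_pos hc]
    · rw [if_neg hc]
      -- both recurse with the same updated set; show the updates agree
      have hupd :
          (if c == '(' &&
              (match PySem.List.pyGet? (pre ++ c :: rest') ((pre.length : Int) - 1) with
               | some c' => pyIsAlpha c'
               | none => false) then
            (if walkA (pre ++ c :: rest') (pre.length + 1) ((pre.length : Int) - 1) [] ≠ [] ∧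
                String.ofList (walkA (pre ++ c :: rest') (pre.length + 1) ((pre.length : Int) - 1) []) ∉ (["leq"] : List String)
             then PySem.Set.add s (String.ofList (walkA (pre ++ c :: rest') (pre.length + 1) ((pre.length : Int) - 1) []))
             else s)
          else s)
          = (if c = '(' ∧ tokRun pre ≠ [] ∧ pyIsAlpha ((tokRun pre).getLast?.getD ' ') ∧
                String.ofList (tokRun pre) ≠ "leq"
             then PySem.Set.add s (String.ofList (tokRun pre)) else s) := by
        rcases eq_or_ne c '(' with rfl | hpar
        swap
        · have : (c == '(') = false := by simp [hpar]
          simp [this, hpar]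
        simp only [beq_self_eq_true, Bool.true_and, true_and]
        rcases pre.eq_nil_or_concat' with rfl | ⟨pre'', p, rfl⟩
        · -- pre = []: A probes axiom[-1] (negative wraparound) but the signature is empty either way
          have hwalk := walkA_spec [] ('(' :: rest') 1 [] (by simp)
          simp only [List.nil_append, List.length_nil, Nat.cast_zero, zero_sub, tokRun_nil,
            List.append_nil] at hwalk ⊢
          cases PySem.List.pyGet? ('(' :: rest') (-1 : Int) with
          | none => simp
          | some z =>
            by_cases hz : pyIsAlpha z
            · simp [hz, hwalk]
            · simp [hz]
        · have hlen : (((pre'' ++ [p]).length : Int)) - 1 = (pre''.length : Int) := by simp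
          have hget : PySem.List.pyGet? (pre'' ++ [p] ++ '(' :: rest') (pre''.length : Int) = some p := by
            rw [List.append_assoc, List.singleton_append]
            exact PySem.List.pyGet?_append_length pre'' ('(' :: rest') p
          have hwalk := walkA_spec (pre'' ++ [p]) ('(' :: rest') ((pre'' ++ [p]).length + 1) []
            (by omega)
          rw [List.append_nil, hlen] at hwalk
          rw [hlen, hget, hwalk]
          by_cases hp : pyIsAlpha p
          · have hpt : tokChar p := by simp [tokChar, hp]
            have htr : tokRun (pre'' ++ [p]) = tokRun pre'' ++ [p] := by
              rw [tokRun_concat, if_pos hpt]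
            have hne : tokRun (pre'' ++ [p]) ≠ [] := by rw [htr]; simp
            have hlast : pyIsAlpha ((tokRun (pre'' ++ [p])).getLast?.getD ' ') = true := by
              rw [getLast_tokRun_concat _ _ hpt]; exact hp
            simp [hp, hne, hlast]
          · -- previous char not a letter: A skips; B's tok is empty or ends in p (not a letter)
            simp only [hp, Bool.false_eq_true, if_false]
            by_cases hpt : tokChar p
            · rw [if_neg]
              rintro ⟨hne', hal, -⟩
              rw [getLast_tokRun_concat _ _ hpt] at hal
              exact hp hal
            · have : tokRun (pre'' ++ [p]) = [] := by rw [tokRun_concat, if_neg hpt]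
              simp [this]
      rw [hupd, hfull, ihc, tokRun_concat, if_neg hc]

lemma line_eq (cs : List Char) (s : PySem.Set String) :
    lineA cs cs 0 s = goB cs [] s := by
  simpa [tokRun_nil] using lineA_eq_goB cs [] s

lemma signatures_eq (lines : List String) : signatures lines = signatures_alt lines := by
  unfold signatures signatures_alt
  induction lines using List.reverseRecOn with
  | nil => rfl
  | append_singleton xs x ih =>
    rw [List.foldl_append, List.foldl_append, ih]
    simp [line_eq]

-- ===== VERDICT (by name: the statement is the Claim_ definition above) =====
theorem signatures_spec : Claim_equal_signatures := by
  intro lines _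
  exact signatures_eq lines
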